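-- pv_equiv track=rewrite | github.com/naoTimesdev/qingque-data | scripts/sr_common.py | remap_path_name
-- ===== SOURCE A (Python) =====
-- def remap_path_name(path_name: str):
--     replacer = {
--         "Knight": "Preservation",
--         "Pirest": "Abundance",
--         "Priest": "Abundance",
--         "Warrior": "Destruction",
--         "Rogue": "Hunt",
--         "Mage": "Erudition",
--         "Shaman": "Harmony",
--         "Warlock": "Nihility",
--     }
--     for key, value in replacer.items():
--         path_name = path_name.replace(key, value)
--     return path_name
-- ===== SOURCE B (Python) =====
-- def remap_path_name(path_name: str):
--     replacer = {
--         "Knight": "Preservation",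
--         "Pirest": "Abundance",
--         "Priest": "Abundance",
--         "Warrior": "Destruction",
--         "Rogue": "Hunt",
--         "Mage": "Erudition",
--         "Shaman": "Harmony",
--         "Warlock": "Nihility",
--     }
--     out = []
--     i = 0
--     n = len(path_name)
--     while i < n:
--         for key, value in replacer.items():
--             if path_name.startswith(key, i):
--                 out.append(value)
--                 i += len(key)
--                 break
--         else:
--             out.append(path_name[i])
--             i += 1
--     return "".join(out)
-- ===== Notes on version B (the rewrite author's own statement) =====
-- stated objective: alternative
-- what changed: Replaced eight sequential full-string replace passes with a single left-to-right scan that at each position looks up the first matching key in the table and emits its replacement, relying on the keys being non-overlapping and absent from all replacement values.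
import Mathlib
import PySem

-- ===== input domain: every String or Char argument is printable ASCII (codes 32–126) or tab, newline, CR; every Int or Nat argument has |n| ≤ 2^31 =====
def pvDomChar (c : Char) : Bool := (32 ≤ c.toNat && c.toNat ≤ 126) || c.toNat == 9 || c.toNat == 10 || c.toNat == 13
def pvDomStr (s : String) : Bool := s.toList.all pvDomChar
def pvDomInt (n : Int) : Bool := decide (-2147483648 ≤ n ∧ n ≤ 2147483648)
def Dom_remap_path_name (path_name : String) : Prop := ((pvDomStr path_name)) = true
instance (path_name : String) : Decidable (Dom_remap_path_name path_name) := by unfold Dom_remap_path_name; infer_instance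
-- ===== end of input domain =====

-- One honest line: B replaces A's eight sequential full-string replace passes by a single
-- left-to-right scan with a first-match table lookup (alternative algorithm, same result).

-- ===== PORT A =====
-- the dict literal, in insertion order (dict[str,str] -> association list)
def pvReplacer : List (String × String) :=
  [("Knight", "Preservation"), ("Pirest", "Abundance"), ("Priest", "Abundance"),
   ("Warrior", "Destruction"), ("Rogue", "Hunt"), ("Mage", "Erudition"),
   ("Shaman", "Harmony"), ("Warlock", "Nihility")]

-- A: for key, value in replacer.items(): path_name = path_name.replace(key, value)
def remap_path_name (path_name : String) : String :=
  pvReplacer.foldl (fun s kv => PySem.Str.replace s kv.1 kv.2) path_name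

-- ===== PORT B =====
-- B's own copy of the table, at the char-list level
def pvPairs : List (List Char × List Char) :=
  [("Knight".toList, "Preservation".toList), ("Pirest".toList, "Abundance".toList),
   ("Priest".toList, "Abundance".toList), ("Warrior".toList, "Destruction".toList),
   ("Rogue".toList, "Hunt".toList), ("Mage".toList, "Erudition".toList),
   ("Shaman".toList, "Harmony".toList), ("Warlock".toList, "Nihility".toList)]

-- the inner `for … break/else`: first table entry whose key starts at the current position
def pvFindPair (P : List (List Char × List Char)) (s : List Char) : Option (List Char × List Char) :=
  match P with
  | [] => none
  | (k, v) :: rest => if k.isPrefixOf s then some (k, v) else pvFindPair rest s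

-- the `while i < n` scan, building the output pieces front to back
def pvScan (P : List (List Char × List Char)) : List Char → List Char
  | [] => []
  | c :: t =>
    match pvFindPair P (c :: t) with
    | some (k, v) => v ++ pvScan P (t.drop (k.length - 1))
    | none => c :: pvScan P t
  termination_by s => s.length
  decreasing_by
  · simp only [List.length_cons]
    have := List.length_drop (i := k.length - 1) (l := t)
    omega
  · simp

def remap_path_name_alt (path_name : String) : String :=
  String.ofList (pvScan pvPairs path_name.toList)

-- ===== PRECONDITION & SPEC =====
def Spec_remap_path_name (path_name : String) (out : String) : Prop := out = remap_path_name_alt path_name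
instance (path_name : String) (out : String) : Decidable (Spec_remap_path_name path_name out) := by unfold Spec_remap_path_name; infer_instance

-- ===== CLAIM (what is proved, stated in full; the proofs are below) =====
def Claim_equal_remap_path_name : Prop := ∀ (path_name : String), Dom_remap_path_name path_name → Spec_remap_path_name path_name (remap_path_name path_name)

-- ===== LEMMAS AND PROOFS =====

-- a simple structural recursion equal to PySem.Chars.replace for a nonempty pattern
def pvRepl (k v : List Char) : List Char → List Char
  | [] => []
  | c :: t =>
    if k.isPrefixOf (c :: t) then v ++ pvRepl k v (t.drop (k.length - 1))
    else c :: pvRepl k v t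
  termination_by s => s.length
  decreasing_by
  · simp only [List.length_cons]
    have := List.length_drop (i := k.length - 1) (l := t)
    omega
  · simp

-- A's fold, at the char-list level
def pvSeq (P : List (List Char × List Char)) (s : List Char) : List Char :=
  P.foldl (fun s kv => pvRepl kv.1 kv.2 s) s


theorem pvNotPrefix_bool {l₁ l₂ : List Char} (h : ¬ l₁ <+: l₂) : l₁.isPrefixOf l₂ = false :=
  Bool.eq_false_iff.mpr (fun hx => h (List.isPrefixOf_iff_prefix.mp hx))

-- table well-formedness: keys/values nonempty, head uppercase, tail free of uppercase chars
def pvOkPair (k v : List Char) : Bool :=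
  !k.isEmpty && !v.isEmpty && (k.headD 'a').isUpper && (v.headD 'a').isUpper
    && (k.drop 1).all (fun c => !c.isUpper) && (v.drop 1).all (fun c => !c.isUpper)

theorem pvTable_ok : ∀ e ∈ pvPairs, pvOkPair e.1 e.2 = true := by decide

theorem pvTable_nodup : (pvPairs.map Prod.fst).Nodup := by decide

-- no key agrees with the overlap of another key or of any value
theorem pvTable_cross : ∀ e ∈ pvPairs, ∀ e' ∈ pvPairs,
    (e.1 ≠ e'.1 → ((e.1.take e'.1.length).isPrefixOf e'.1) = false) ∧
    ((e.1.take e'.2.length).isPrefixOf e'.2) = false := by decide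

-- "k can start nowhere inside a": at no position p < a.length does k match in a ++ x
def pvNoMatchIn (k a : List Char) : Prop :=
  ∀ (x : List Char) (p : Nat), p < a.length → ¬ k <+: (a ++ x).drop p

theorem pvNoMatchIn_of (k a : List Char) (ku : Char) (kt : List Char)
    (hk : k = ku :: kt) (hku : ku.isUpper = true)
    (ha : ∀ c ∈ a.drop 1, c.isUpper = false)
    (h0 : (k.take a.length).isPrefixOf a = false) : pvNoMatchIn k a := by
  intro x p hp hpre
  cases p with
  | zero =>
    rw [List.drop_zero] at hpre
    have htk : k.take a.length <+: (a ++ x).take a.length := hpre.take a.length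
    rw [List.take_left] at htk
    rw [← List.isPrefixOf_iff_prefix] at htk
    rw [h0] at htk
    exact Bool.noConfusion htk
  | succ q =>
    have hd : (a ++ x).drop (q + 1) = a.drop (q + 1) ++ x :=
      List.drop_append_of_le_length (by omega)
    have hlen : 0 < (a.drop (q + 1)).length := by
      rw [List.length_drop]; omega
    obtain ⟨b, rest, hbr⟩ : ∃ b rest, a.drop (q + 1) = b :: rest := by
      cases hcase : a.drop (q + 1) with
      | nil => rw [hcase] at hlen; simp at hlen
      | cons b rest => exact ⟨b, rest, rfl⟩
    rw [hd, hbr, hk] at hpre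
    obtain ⟨u, hu⟩ := hpre
    have hub : ku = b := by
      have := congrArg (fun l => l.headD 'a') hu
      simpa using this
    have hbmem : b ∈ a.drop 1 := by
      have : a.drop (q + 1) = (a.drop 1).drop q := by
        rw [List.drop_drop, Nat.add_comm]
      have hbm : b ∈ (a.drop 1).drop q := by
        rw [← this, hbr]; exact List.mem_cons_self
      exact List.mem_of_mem_drop hbm
    have := ha b hbmem
    rw [← hub, hku] at this
    exact Bool.noConfusion this

-- pvRepl leaves a region with no match untouched
theorem pvRepl_append (k v a : List Char) (hnm : pvNoMatchIn k a) :
    ∀ x, pvRepl k v (a ++ x) = a ++ pvRepl k v x := by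
  induction a with
  | nil => intro x; simp
  | cons c a' ih =>
    intro x
    have h0 : ¬ k <+: c :: (a' ++ x) := by
      have := hnm x 0 (by simp)
      simpa using this
    have hnot : k.isPrefixOf (c :: (a' ++ x)) = false := pvNotPrefix_bool h0
    rw [List.cons_append, pvRepl, hnot]
    simp only [Bool.false_eq_true, if_false]
    rw [ih (fun x p hp => by
      have := hnm x (p + 1) (by simp; omega)
      simpa using this) x]
    simp

-- pvRepl fires on a key at the head
theorem pvRepl_self (k v : List Char) (hk : k ≠ []) :
    ∀ x, pvRepl k v (k ++ x) = v ++ pvRepl k v x := by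
  intro x
  cases k with
  | nil => exact absurd rfl hk
  | cons ku kt =>
    have hpre : (ku :: kt).isPrefixOf (ku :: kt ++ x) = true := by
      rw [List.isPrefixOf_iff_prefix]; exact List.prefix_append _ _
    rw [List.cons_append, pvRepl]
    simp only [← List.cons_append, hpre, if_true]
    congr 1
    have : (ku :: kt).length - 1 = kt.length := by simp
    rw [this, List.drop_left]

-- a prefix of pvRepl's output containing no uppercase char was already a prefix of the input
theorem pvRepl_prefix_nonupper (k v : List Char) (ku vu : Char) (kt vt : List Char)
    (_hk : k = ku :: kt) (hv : v = vu :: vt) (hvu : vu.isUpper = true) :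
    ∀ (s w : List Char), (∀ c ∈ w, c.isUpper = false) → w <+: pvRepl k v s → w <+: s := by
  intro s
  induction s using pvRepl.induct k with
  | case1 =>
    intro w _ hw
    rw [pvRepl] at hw
    simpa using hw
  | case2 c t hpre ih =>
    intro w hwu hw
    rw [pvRepl, if_pos hpre, hv] at hw
    cases w with
    | nil => exact List.nil_prefix
    | cons b w' =>
      obtain ⟨u, hu⟩ := hw
      have hbv : b = vu := by
        have := congrArg (fun l => l.headD 'a') hu
        simpa using this
      have hfalse := hwu b List.mem_cons_self
      rw [hbv, hvu] at hfalse
      exact Bool.noConfusion hfalse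
  | case3 c t hpre ih =>
    intro w hwu hw
    rw [pvRepl, if_neg hpre] at hw
    cases w with
    | nil => exact List.nil_prefix
    | cons b w' =>
      rw [List.cons_prefix_cons] at hw
      obtain ⟨hb, hw'⟩ := hw
      have := ih w' (fun c hc => hwu c (List.mem_cons_of_mem _ hc)) hw'
      rw [List.cons_prefix_cons]
      exact ⟨hb, this⟩

theorem pvSeq_nil (P : List (List Char × List Char)) : pvSeq P [] = [] := by
  induction P with
  | nil => rfl
  | cons e Q ih =>
    show pvSeq Q (pvRepl e.1 e.2 []) = []
    rw [pvRepl]; exact ih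

theorem pvSeq_cons (e : List Char × List Char) (Q : List (List Char × List Char)) (s : List Char) :
    pvSeq (e :: Q) s = pvSeq Q (pvRepl e.1 e.2 s) := rfl

-- the whole fold leaves a match-free region untouched
theorem pvSeq_append (P : List (List Char × List Char)) (a : List Char)
    (h : ∀ e ∈ P, pvNoMatchIn e.1 a) :
    ∀ x, pvSeq P (a ++ x) = a ++ pvSeq P x := by
  induction P with
  | nil => intro x; rfl
  | cons e Q ih =>
    intro x
    rw [pvSeq_cons, pvRepl_append e.1 e.2 a (h e List.mem_cons_self) x,
      ih (fun e' he' => h e' (List.mem_cons_of_mem _ he')), pvSeq_cons]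

-- helper to destructure pvOkPair
theorem pvOkPair_shape (k v : List Char) (h : pvOkPair k v = true) :
    ∃ ku kt vu vt, k = ku :: kt ∧ v = vu :: vt ∧ ku.isUpper = true ∧ vu.isUpper = true ∧
      (∀ c ∈ kt, c.isUpper = false) ∧ (∀ c ∈ vt, c.isUpper = false) := by
  cases k with
  | nil => simp [pvOkPair] at h
  | cons ku kt =>
    cases v with
    | nil => simp [pvOkPair] at h
    | cons vu vt =>
      simp only [pvOkPair, Bool.and_eq_true] at h
      refine ⟨ku, kt, vu, vt, rfl, rfl, by simpa using h.1.1.1.2, by simpa using h.1.1.2, ?_, ?_⟩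
      · intro c hc
        have := List.all_eq_true.mp h.1.2 c (by simpa using hc)
        simpa using this
      · intro c hc
        have := List.all_eq_true.mp h.2 c (by simpa using hc)
        simpa using this

-- when no key matches at the head, the fold keeps the head character
theorem pvSeq_cons_of_no_match (P : List (List Char × List Char)) (c : Char) (t : List Char)
    (hP : ∀ e ∈ P, pvOkPair e.1 e.2 = true)
    (hnp : ∀ e ∈ P, ¬ e.1 <+: c :: t) :
    ∀ t', (∀ w, (∀ ch ∈ w, ch.isUpper = false) → w <+: t' → w <+: t) →
      pvSeq P (c :: t') = c :: pvSeq P t' := by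
  induction P with
  | nil => intro t' _; rfl
  | cons e Q ih =>
    intro t' htr
    obtain ⟨ku, kt, vu, vt, hk, hv, hku, hvu, hkt, hvt⟩ :=
      pvOkPair_shape e.1 e.2 (hP e List.mem_cons_self)
    have hnot : ¬ e.1 <+: c :: t' := by
      intro hpre
      rw [hk, List.cons_prefix_cons] at hpre
      obtain ⟨hc, hkt'⟩ := hpre
      have := htr kt hkt hkt'
      exact hnp e List.mem_cons_self (by rw [hk, hc, List.cons_prefix_cons]; exact ⟨rfl, this⟩)
    have hnotb : e.1.isPrefixOf (c :: t') = false := pvNotPrefix_bool hnot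
    rw [pvSeq_cons, pvRepl, hnotb]
    simp only [Bool.false_eq_true, if_false]
    rw [ih (fun e' he' => hP e' (List.mem_cons_of_mem _ he'))
      (fun e' he' => hnp e' (List.mem_cons_of_mem _ he')) (pvRepl e.1 e.2 t')
      (fun w hwu hw => htr w hwu
        (pvRepl_prefix_nonupper e.1 e.2 ku vu kt vt hk hv hvu t' w hwu hw)),
      pvSeq_cons]

-- pvFindPair characterisations
theorem pvFindPair_none (P : List (List Char × List Char)) (s : List Char)
    (h : pvFindPair P s = none) : ∀ e ∈ P, ¬ e.1 <+: s := by
  induction P with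
  | nil => intro e he; simp at he
  | cons e' Q ih =>
    intro e he
    rw [pvFindPair] at h
    by_cases hp : e'.1.isPrefixOf s
    · obtain ⟨a, b⟩ := e'
      simp [hp] at h
    · obtain ⟨a, b⟩ := e'
      simp only [hp, Bool.false_eq_true, if_false] at h
      rcases List.mem_cons.mp he with h1 | h1
      · subst h1
        rw [← List.isPrefixOf_iff_prefix]
        simpa using hp
      · exact ih h e h1

theorem pvFindPair_some (P : List (List Char × List Char)) (s : List Char) (k v : List Char)
    (h : pvFindPair P s = some (k, v)) :
    ∃ P₁ P₂, P = P₁ ++ (k, v) :: P₂ ∧ k <+: s := by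
  induction P with
  | nil => simp [pvFindPair] at h
  | cons e' Q ih =>
    obtain ⟨a, b⟩ := e'
    rw [pvFindPair] at h
    by_cases hp : a.isPrefixOf s
    · simp only [hp, if_true, Option.some.injEq, Prod.mk.injEq] at h
      refine ⟨[], Q, ?_, ?_⟩
      · rw [h.1, h.2]; rfl
      · rw [← h.1]; exact List.isPrefixOf_iff_prefix.mp hp
    · simp only [hp, Bool.false_eq_true, if_false] at h
      obtain ⟨P₁, P₂, hP, hpre⟩ := ih h
      exact ⟨(a, b) :: P₁, P₂, by rw [hP, List.cons_append], hpre⟩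

-- membership transfer through the split
theorem pvSplit_mem {P₁ P₂ : List (List Char × List Char)} {e kv : List Char × List Char}
    (hP : pvPairs = P₁ ++ kv :: P₂) (he : e ∈ P₁ ∨ e ∈ P₂) : e ∈ pvPairs := by
  rw [hP]
  rcases he with h | h
  · exact List.mem_append_left _ h
  · exact List.mem_append_right _ (List.mem_cons_of_mem _ h)

theorem pvSplit_ne {P₁ P₂ : List (List Char × List Char)} {e kv : List Char × List Char}
    (hP : pvPairs = P₁ ++ kv :: P₂) (he : e ∈ P₁ ∨ e ∈ P₂) : e.1 ≠ kv.1 := by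
  have hnd := pvTable_nodup
  rw [hP, List.map_append, List.map_cons] at hnd
  rw [List.nodup_append] at hnd
  obtain ⟨hnd1, hnd2, hdisj⟩ := hnd
  rcases he with h | h
  · intro hEq
    exact hdisj e.1 (List.mem_map_of_mem h) kv.1 List.mem_cons_self hEq
  · intro hEq
    rw [List.nodup_cons] at hnd2
    exact hnd2.1 (hEq ▸ List.mem_map_of_mem h)

-- the no-match facts, instantiated at the table
theorem pvNoMatch_key (e e' : List Char × List Char) (he : e ∈ pvPairs) (he' : e' ∈ pvPairs)
    (hne : e.1 ≠ e'.1) : pvNoMatchIn e.1 e'.1 := by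
  obtain ⟨ku, kt, vu, vt, hk, hv, hku, hvu, hkt, hvt⟩ := pvOkPair_shape e.1 e.2 (pvTable_ok e he)
  obtain ⟨ku', kt', vu', vt', hk', hv', hku', hvu', hkt', hvt'⟩ :=
    pvOkPair_shape e'.1 e'.2 (pvTable_ok e' he')
  refine pvNoMatchIn_of e.1 e'.1 ku kt hk hku ?_ ((pvTable_cross e he e' he').1 hne)
  intro c hc
  rw [hk', List.drop_one, List.tail_cons] at hc
  exact hkt' c hc

theorem pvNoMatch_val (e e' : List Char × List Char) (he : e ∈ pvPairs) (he' : e' ∈ pvPairs) :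
    pvNoMatchIn e.1 e'.2 := by
  obtain ⟨ku, kt, vu, vt, hk, hv, hku, hvu, hkt, hvt⟩ := pvOkPair_shape e.1 e.2 (pvTable_ok e he)
  obtain ⟨ku', kt', vu', vt', hk', hv', hku', hvu', hkt', hvt'⟩ :=
    pvOkPair_shape e'.1 e'.2 (pvTable_ok e' he')
  refine pvNoMatchIn_of e.1 e'.2 ku kt hk hku ?_ (pvTable_cross e he e' he').2
  intro c hc
  rw [hv', List.drop_one, List.tail_cons] at hc
  exact hvt' c hc

-- MAIN: A's eight-pass fold equals B's single scan, at the char level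
theorem pvMain : ∀ s, pvSeq pvPairs s = pvScan pvPairs s := by
  intro s
  induction s using pvScan.induct (P := pvPairs) with
  | case1 =>
    rw [pvScan, pvSeq_nil]
  | case2 c t k v hf ih =>
    obtain ⟨P₁, P₂, hP, hpre⟩ := pvFindPair_some pvPairs (c :: t) k v hf
    have hkv_mem : (k, v) ∈ pvPairs := by
      rw [hP]; exact List.mem_append_right _ List.mem_cons_self
    obtain ⟨ku, kt, vu, vt, hk, hv, _, _, _, _⟩ :=
      pvOkPair_shape k v (pvTable_ok (k, v) hkv_mem)
    obtain ⟨r, hr⟩ := hpre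
    have hrdrop : r = t.drop (k.length - 1) := by
      rw [hk] at hr
      rw [List.cons_append] at hr
      injection hr with h1 h2
      rw [hk]
      simp only [List.length_cons, Nat.add_sub_cancel]
      rw [← h2, List.drop_left]
    have step : pvSeq pvPairs (k ++ r) = v ++ pvSeq pvPairs r := by
      rw [hP, pvSeq, List.foldl_append]
      show pvSeq ((k, v) :: P₂) (pvSeq P₁ (k ++ r)) = _
      rw [show pvSeq P₁ (k ++ r) = k ++ pvSeq P₁ r from
        pvSeq_append P₁ k (fun e he => pvNoMatch_key e (k, v) (pvSplit_mem hP (Or.inl he))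
          hkv_mem (pvSplit_ne hP (Or.inl he))) r]
      rw [pvSeq_cons, pvRepl_self k v (by rw [hk]; simp) (pvSeq P₁ r)]
      rw [pvSeq_append P₂ v (fun e he => pvNoMatch_val e (k, v) (pvSplit_mem hP (Or.inr he))
        hkv_mem) (pvRepl k v (pvSeq P₁ r))]
      congr 1
      conv_rhs => rw [pvSeq, List.foldl_append]
      rfl
    rw [pvScan, hf]
    rw [← hr, step, hrdrop, ih]
  | case3 c t hf ih =>
    have hnp := pvFindPair_none pvPairs (c :: t) hf
    rw [pvScan, hf]
    rw [← ih]
    exact pvSeq_cons_of_no_match pvPairs c t pvTable_ok hnp t (fun w _ h => h)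


-- PySem.Chars.replace with a nonempty pattern is the simple recursion pvRepl
theorem pvReplace_go (old new : List Char) (hne : old ≠ []) :
    ∀ (fuel : Nat) (l acc : List Char), l.length ≤ fuel →
      PySem.Chars.replace.go old new fuel l acc = acc.reverse ++ pvRepl old new l := by
  intro fuel
  induction fuel with
  | zero =>
    intro l acc hl
    have : l = [] := by cases l <;> simp_all
    subst this
    rw [pvRepl]
    simp [PySem.Chars.replace.go]
  | succ n ih =>
    intro l acc hl
    cases l with
    | nil =>
      rw [pvRepl]
      simp [PySem.Chars.replace.go]
    | cons c t =>
      rw [pvRepl]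
      by_cases hp : old.isPrefixOf (c :: t)
      · have hdrop : List.drop old.length (c :: t) = t.drop (old.length - 1) := by
          cases old with
          | nil => exact absurd rfl hne
          | cons o ot => simp
        rw [show PySem.Chars.replace.go old new (n + 1) (c :: t) acc =
            PySem.Chars.replace.go old new n (List.drop old.length (c :: t))
              (new.reverse ++ acc) by
          conv_lhs => rw [PySem.Chars.replace.go]
          simp [hp]]
        rw [hdrop, ih _ _ (by
          have hlen := List.length_drop (i := old.length - 1) (l := t)
          simp only [List.length_cons] at hl
          omega)]
        simp [hp]
      · rw [show PySem.Chars.replace.go old new (n + 1) (c :: t) acc =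
            PySem.Chars.replace.go old new n t (c :: acc) by
          conv_lhs => rw [PySem.Chars.replace.go]
          simp [hp]]
        rw [ih _ _ (by simp only [List.length_cons] at hl; omega)]
        simp [hp]

theorem pvReplace_eq_pvRepl (old new s : List Char) (hne : old ≠ []) :
    PySem.Chars.replace s old new = pvRepl old new s := by
  rw [PySem.Chars.replace]
  rw [if_neg (by simpa using hne)]
  rw [pvReplace_go old new hne s.length s [] (le_refl _)]
  rfl

-- glue: port A's String-level fold computes pvSeq on toList
theorem pvA_toList (L : List (String × String)) (s : String)
    (hne : ∀ e ∈ L, e.1.toList ≠ []) :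
    (L.foldl (fun s kv => PySem.Str.replace s kv.1 kv.2) s).toList =
      pvSeq (L.map (fun kv => (kv.1.toList, kv.2.toList))) s.toList := by
  induction L generalizing s with
  | nil => rfl
  | cons e Q ih =>
    rw [List.foldl_cons, List.map_cons, pvSeq_cons]
    rw [ih _ (fun e' he' => hne e' (List.mem_cons_of_mem _ he'))]
    congr 1
    rw [PySem.Str.toList_replace]
    exact pvReplace_eq_pvRepl e.1.toList e.2.toList s.toList (hne e List.mem_cons_self)

theorem remap_path_name_spec : Claim_equal_remap_path_name := by
  intro s _
  unfold Spec_remap_path_name remap_path_name remap_path_name_alt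
  have h1 : (pvReplacer.foldl (fun s kv => PySem.Str.replace s kv.1 kv.2) s).toList =
      pvSeq pvPairs s.toList := by
    rw [pvA_toList pvReplacer s (by decide),
      show pvReplacer.map (fun kv => (kv.1.toList, kv.2.toList)) = pvPairs from by decide]
  have h2 : (pvReplacer.foldl (fun s kv => PySem.Str.replace s kv.1 kv.2) s).toList =
      pvScan pvPairs s.toList := by rw [h1, pvMain]
  rw [← h2]
  exact String.ofList_toList.symm
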